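-- pv_equiv track=rewrite | github.com/yannickloth/W33-Theory | scripts/w33_leech_monster.py | _qpochhammer_arith
-- ===== SOURCE A (Python) =====
-- def _qpochhammer_arith(max_deg: int, step: int, offset: int) -> list[int]:
--     """Compute prod_{k>=0} (1 - q^{offset + k*step}) to max_deg.
--
--     This is a shifted q-Pochhammer (q^offset; q^step)_∞ truncated to max_deg.
--     """
--     if step <= 0:
--         raise ValueError("step must be positive")
--     if offset <= 0:
--         raise ValueError("offset must be positive")
--     poly = [1] + [0] * max_deg
--     power = offset
--     while power <= max_deg:
--         for n in range(max_deg, power - 1, -1):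
--             poly[n] -= poly[n - power]
--         power += step
--     return poly
-- ===== SOURCE B (Python) =====
-- def _qpochhammer_arith(max_deg: int, step: int, offset: int) -> list[int]:
--     """Euler-transform route: log-derivative recurrence n*p[n] = sum_e -e*t_e[n]
--     with one running tail t_e[n] = p[n-e] + t_e[n-e] per factor; division exact."""
--     if step <= 0:
--         raise ValueError("step must be positive")
--     if offset <= 0:
--         raise ValueError("offset must be positive")
--     L = max_deg if max_deg > 0 else 0
--     es = list(range(offset, L + 1, step))
--     tails = [[0] * (L + 1) for _ in es]
--     p = [1] + [0] * L
--     for n in range(1, L + 1):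
--         s = 0
--         for e, t in zip(es, tails):
--             if e <= n:
--                 v = p[n - e] + t[n - e]
--                 t[n] = v
--                 s -= e * v
--         p[n] = s // n
--     return p
-- ===== Notes on version B (the rewrite author's own statement) =====
-- stated objective: alternative
-- what changed: Replaces the repeated polynomial scaling by each (1-q^power) factor with the Euler-transform/log-derivative recurrence n*p[n] = sum_e -e*(p[n-e]+t_e[n-e]) computed with one running tail per factor and exact integer division by n.
import Mathlib
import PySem

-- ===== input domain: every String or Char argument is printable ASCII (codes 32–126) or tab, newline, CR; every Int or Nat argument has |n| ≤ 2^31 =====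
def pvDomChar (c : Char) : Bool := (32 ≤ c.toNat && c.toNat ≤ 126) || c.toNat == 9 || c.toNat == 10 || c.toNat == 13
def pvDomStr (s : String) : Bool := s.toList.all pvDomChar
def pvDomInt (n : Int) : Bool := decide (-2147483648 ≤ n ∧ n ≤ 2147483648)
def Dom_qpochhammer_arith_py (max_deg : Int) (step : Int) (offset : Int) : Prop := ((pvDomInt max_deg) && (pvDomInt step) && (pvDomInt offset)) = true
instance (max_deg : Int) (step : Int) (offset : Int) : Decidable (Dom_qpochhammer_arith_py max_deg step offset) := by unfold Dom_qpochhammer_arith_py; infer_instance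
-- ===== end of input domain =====

-- B replaces A's per-factor polynomial scaling with the Euler-transform route (divisor-sum
-- table + log-derivative recurrence with exact division); same cost class, alternative algorithm.

-- ===== PORT A =====
-- Indexing/assignment is via PySem.List.pyGetD/pySetD (exact: under Pre_ every index Python
-- touches is in range).  The '0 < step' conjunct in the loop guard only makes the recursion
-- total: Python has already raised ValueError before the loop whenever step ≤ 0.
def qpochAStep (max_deg power : Int) (poly : List Int) : List Int :=
  (PySem.List.pyRange max_deg (power - 1) (-1)).foldl
    (fun acc n =>
      PySem.List.pySetD acc n (PySem.List.pyGetD acc n 0 - PySem.List.pyGetD acc (n - power) 0))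
    poly

def qpochALoop (max_deg step power : Int) (poly : List Int) : List Int :=
  if h : power ≤ max_deg ∧ 0 < step then
    qpochALoop max_deg step (power + step) (qpochAStep max_deg power poly)
  else poly
termination_by (max_deg + 1 - power).toNat
decreasing_by omega

def qpochhammer_arith_py (max_deg : Int) (step : Int) (offset : Int) : List Int :=
  if step ≤ 0 then []            -- Python raises ValueError: outside Pre_
  else if offset ≤ 0 then []     -- Python raises ValueError: outside Pre_
  else qpochALoop max_deg step offset (1 :: List.replicate max_deg.toNat 0)

-- ===== PORT B =====
-- Transliteration of Source B: the factor list es, then for n = 1..L the recurrence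
-- n*p[n] = sum over factors e <= n of -e*(p[n-e] + t_e[n-e]), one running tail t_e per
-- factor (updated in place in Python, rebuilt positionally here), exact division // n.
def qpochBStep (p : List Int) (n : Int) (ets : List (Int × List Int)) : Int × List (List Int) :=
  ets.foldl
    (fun acc et =>
      if et.1 ≤ n then
        let v := PySem.List.pyGetD p (n - et.1) 0 + PySem.List.pyGetD et.2 (n - et.1) 0
        (acc.1 - et.1 * v, acc.2 ++ [PySem.List.pySetD et.2 n v])
      else (acc.1, acc.2 ++ [et.2]))
    (0, [])

def qpochhammer_arith_py_alt (max_deg : Int) (step : Int) (offset : Int) : List Int :=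
  if step ≤ 0 then []            -- Python raises ValueError: outside Pre_
  else if offset ≤ 0 then []     -- Python raises ValueError: outside Pre_
  else
    let L : Int := if max_deg > 0 then max_deg else 0
    let es := PySem.List.pyRange offset (L + 1) step
    ((PySem.List.pyRange 1 (L + 1) 1).foldl
        (fun st n =>
          let r := qpochBStep st.1 n (es.zip st.2)
          (PySem.List.pySetD st.1 n (PySem.Int.floordiv r.1 n), r.2))
        (1 :: List.replicate L.toNat 0, es.map (fun _ => List.replicate (L + 1).toNat 0))).1

-- ===== PRECONDITION & SPEC =====
-- Pre_ excludes exactly the inputs with step ≤ 0 or offset ≤ 0, on which Python A raises ValueError.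
def Pre_qpochhammer_arith_py (max_deg : Int) (step : Int) (offset : Int) : Prop :=
  0 < step ∧ 0 < offset
instance (max_deg : Int) (step : Int) (offset : Int) : Decidable (Pre_qpochhammer_arith_py max_deg step offset) := by unfold Pre_qpochhammer_arith_py; infer_instance

def pvWitness_qpochhammer_arith_py : Int × Int × Int := (6, 2, 1)

def Spec_qpochhammer_arith_py (max_deg : Int) (step : Int) (offset : Int) (out : List Int) : Prop := out = qpochhammer_arith_py_alt max_deg step offset
instance (max_deg : Int) (step : Int) (offset : Int) (out : List Int) : Decidable (Spec_qpochhammer_arith_py max_deg step offset out) := by unfold Spec_qpochhammer_arith_py; infer_instance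

-- ===== CLAIM (what is proved, stated in full; the proofs are below) =====
def Claim_equal_qpochhammer_arith_py : Prop := ∀ (max_deg : Int) (step : Int) (offset : Int), Dom_qpochhammer_arith_py max_deg step offset → Pre_qpochhammer_arith_py max_deg step offset → Spec_qpochhammer_arith_py max_deg step offset (qpochhammer_arith_py max_deg step offset)

-- ===== LEMMAS AND PROOFS =====

theorem getD_set_int (l : List Int) (i k : ℕ) (v : Int) (hi : i < l.length) :
    (l.set i v).getD k 0 = if k = i then v else l.getD k 0 := by
  simp only [List.getD_eq_getElem?_getD, List.getElem?_set]
  by_cases h : k = i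
  · subst h; simp [hi]
  · have h' : ¬ (i = k) := fun e => h e.symm
    simp [h, h']

theorem foldADown (power : Int) (hp : 1 ≤ power) :
    ∀ (N : ℕ) (t : Int) (l : List Int), (t - (power - 1)).toNat ≤ N → t < (l.length : Int) →
      (((PySem.List.pyRange t (power - 1) (-1)).foldl
          (fun acc n => PySem.List.pySetD acc n (PySem.List.pyGetD acc n 0 - PySem.List.pyGetD acc (n - power) 0)) l).length = l.length
      ∧ ∀ k : ℕ, k < l.length →
        ((PySem.List.pyRange t (power - 1) (-1)).foldl
          (fun acc n => PySem.List.pySetD acc n (PySem.List.pyGetD acc n 0 - PySem.List.pyGetD acc (n - power) 0)) l).getD k 0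
          = l.getD k 0 - (if power ≤ (k : Int) ∧ (k : Int) ≤ t then l.getD (k - power.toNat) 0 else 0)) := by
  intro N
  induction N with
  | zero =>
    intro t l hN hlen
    have hnil : t ≤ power - 1 := by omega
    rw [PySem.List.pyRange_neg_one_eq_nil hnil]
    refine ⟨by simp, fun k hk => ?_⟩
    simp only [List.foldl_nil]
    rw [if_neg (by omega), sub_zero]
  | succ N ih =>
    intro t l hN hlen
    by_cases hc : t ≤ power - 1
    · rw [PySem.List.pyRange_neg_one_eq_nil hc]
      refine ⟨by simp, fun k hk => ?_⟩
      simp only [List.foldl_nil]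
      rw [if_neg (by omega), sub_zero]
    · rw [PySem.List.pyRange_neg_one_cons (by omega)]
      rw [List.foldl_cons]
      set tn : ℕ := t.toNat with htn
      have htc : ((tn : ℤ)) = t := by omega
      have htlt : tn < l.length := by omega
      have hv1 : PySem.List.pyGetD l t 0 = l.getD tn 0 := by
        rw [← htc, PySem.List.pyGetD_natCast]
      have hv2 : PySem.List.pyGetD l (t - power) 0 = l.getD (tn - power.toNat) 0 := by
        rw [show t - power = (((tn - power.toNat : ℕ)) : ℤ) by omega, PySem.List.pyGetD_natCast]
      set v : Int := PySem.List.pyGetD l t 0 - PySem.List.pyGetD l (t - power) 0 with hvdef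
      have hset : PySem.List.pySetD l t v = l.set tn v := by
        rw [← htc, PySem.List.pySetD_natCast]
      rw [hset]
      have hlen' : ((l.set tn v).length : Int) = l.length := by simp
      obtain ⟨ihlen, ihval⟩ := ih (t - 1) (l.set tn v) (by omega) (by omega)
      constructor
      · rw [ihlen]; simp
      · intro k hk
        have hk' : k < (l.set tn v).length := by simp [hk]
        rw [ihval k hk']
        rw [getD_set_int l tn k v htlt]
        by_cases hke : k = tn
        · subst hke
          rw [if_pos rfl, if_neg (by omega), if_pos (by omega)]
          rw [hvdef, hv1, hv2]
          ring
        · rw [if_neg hke]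
          by_cases hcnd : power ≤ (k : Int) ∧ (k : Int) ≤ t - 1
          · rw [if_pos hcnd, if_pos (by omega)]
            rw [getD_set_int l tn _ v htlt, if_neg (by omega)]
          · rw [if_neg hcnd, if_neg (by omega)]

def cfZ : List Int → Int → Int
  | [], n => if n = 0 then 1 else 0
  | e :: E, n => cfZ E n - (if e ≤ n then cfZ E (n - e) else 0)

def exps (bound step e : Int) : List Int :=
  if h : e ≤ bound ∧ 0 < step then e :: exps bound step (e + step) else []
termination_by (bound + 1 - e).toNat
decreasing_by omega


-- one multiplication step turns coefficients cfZ F into cfZ (power :: F)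
theorem stepA_char (max_deg power : Int) (l : List Int) (F : List Int)
    (hp : 1 ≤ power) (hpm : power ≤ max_deg) (hlen : (l.length : Int) = max_deg + 1)
    (hco : ∀ k : ℕ, k < l.length → l.getD k 0 = cfZ F (k : Int)) :
    (qpochAStep max_deg power l).length = l.length ∧
    ∀ k : ℕ, k < l.length → (qpochAStep max_deg power l).getD k 0 = cfZ (power :: F) (k : Int) := by
  obtain ⟨h1, h2⟩ := foldADown power hp (max_deg - (power - 1)).toNat max_deg l (by omega) (by omega)
  refine ⟨h1, fun k hk => ?_⟩
  show (List.foldl (fun acc n => PySem.List.pySetD acc n (PySem.List.pyGetD acc n 0 - PySem.List.pyGetD acc (n - power) 0)) l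
        (PySem.List.pyRange max_deg (power - 1) (-1))).getD k 0 = _
  rw [h2 k hk]
  rw [show cfZ (power :: F) (k : Int) = cfZ F k - (if power ≤ (k : Int) then cfZ F ((k : Int) - power) else 0) from rfl]
  rw [hco k hk]
  congr 1
  by_cases hc : power ≤ (k : Int)
  · rw [if_pos ⟨hc, by omega⟩, if_pos hc]
    rw [hco (k - power.toNat) (by omega)]
    congr 1
    omega
  · rw [if_neg (by omega), if_neg hc]

theorem loopA_char (max_deg step : Int) (hst : 0 < step) :
    ∀ (N : ℕ) (power : Int) (l : List Int) (F : List Int), (max_deg + 1 - power).toNat ≤ N →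
      1 ≤ power → (l.length : Int) = max_deg + 1 →
      (∀ k : ℕ, k < l.length → l.getD k 0 = cfZ F (k : Int)) →
      (qpochALoop max_deg step power l).length = l.length ∧
      ∀ k : ℕ, k < l.length →
        (qpochALoop max_deg step power l).getD k 0 = cfZ ((exps max_deg step power).reverse ++ F) (k : Int) := by
  intro N
  induction N with
  | zero =>
    intro power l F hN hp hlen hco
    rw [qpochALoop, dif_neg (by omega), exps, dif_neg (by omega)]
    exact ⟨rfl, fun k hk => by simpa using hco k hk⟩
  | succ N ih =>
    intro power l F hN hp hlen hco
    by_cases hc : power ≤ max_deg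
    · rw [qpochALoop, dif_pos ⟨hc, hst⟩]
      obtain ⟨s1, s2⟩ := stepA_char max_deg power l F hp hc hlen hco
      obtain ⟨i1, i2⟩ := ih (power + step) (qpochAStep max_deg power l) (power :: F)
        (by omega) (by omega) (by rw [s1]; exact hlen) (by intro k hk; rw [s1] at hk; exact s2 k hk)
      refine ⟨by rw [i1, s1], fun k hk => ?_⟩
      rw [i2 k (by rw [s1]; exact hk)]
      rw [show exps max_deg step power = power :: exps max_deg step (power + step) from by
        conv_lhs => rw [exps]
        rw [dif_pos ⟨hc, hst⟩]]
      simp [List.reverse_cons, List.append_assoc]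
    · rw [qpochALoop, dif_neg (by omega), exps, dif_neg (by omega)]
      exact ⟨rfl, fun k hk => by simpa using hco k hk⟩

def ddv (E : List Int) (m : Int) : Int := -((E.filter (fun x => x ∣ m)).sum)

theorem ddv_cons (e : Int) (E : List Int) (m : Int) :
    ddv (e :: E) m = (if e ∣ m then -e else 0) + ddv E m := by
  by_cases h : e ∣ m <;> simp [ddv, h] <;> ring


theorem ddv_reverse (E : List Int) (m : Int) : ddv E.reverse m = ddv E m := by
  simp [ddv]

theorem cfZ_zero (E : List Int) (hE : ∀ x ∈ E, 1 ≤ x) : cfZ E 0 = 1 := by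
  induction E with
  | nil => simp [cfZ]
  | cons e E ih =>
    have he : 1 ≤ e := hE e (by simp)
    simp only [cfZ]
    rw [ih (fun x hx => hE x (by simp [hx])), if_neg (by omega)]
    ring

-- sum over the multiples of en in [1, n], reindexed as i*en
theorem sum_multiples (f : ℕ → ℤ) (en n : ℕ) (hen : 1 ≤ en) :
    ∑ m ∈ (Finset.Icc 1 n).filter (fun m => en ∣ m), f m = ∑ i ∈ Finset.Icc 1 (n / en), f (i * en) := by
  have hen0 : 0 < en := hen
  have hJle : ∀ i, i ≤ n / en ↔ i * en ≤ n := fun i => Nat.le_div_iff_mul_le hen0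
  refine Finset.sum_nbij' (fun m => m / en) (fun i => i * en) ?_ ?_ ?_ ?_ ?_
  · intro m hm
    simp only [Finset.mem_filter, Finset.mem_Icc] at hm
    obtain ⟨⟨h1, h2⟩, hd⟩ := hm
    simp only [Finset.mem_Icc]
    refine ⟨(Nat.one_le_div_iff hen0).mpr (Nat.le_of_dvd (by omega) hd), ?_⟩
    rw [hJle]
    exact le_trans (Nat.div_mul_le_self m en) h2
  · intro i hi
    simp only [Finset.mem_Icc] at hi
    simp only [Finset.mem_filter, Finset.mem_Icc]
    refine ⟨⟨by nlinarith, (hJle i).mp hi.2⟩, ⟨i, by ring⟩⟩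
  · intro m hm
    simp only [Finset.mem_filter, Finset.mem_Icc] at hm
    exact Nat.div_mul_cancel hm.2
  · intro i hi
    exact Nat.mul_div_cancel _ hen0
  · intro m hm
    simp only [Finset.mem_filter, Finset.mem_Icc] at hm
    rw [Nat.div_mul_cancel hm.2]

theorem tel (E : List Int) (en : ℕ) (hen : 1 ≤ en) (n : ℕ) :
    ∑ m ∈ (Finset.Icc 1 n).filter (fun m => en ∣ m), cfZ ((en : ℤ) :: E) ((n : ℤ) - (m : ℤ))
      = if (en : ℤ) ≤ (n : ℤ) then cfZ E ((n : ℤ) - (en : ℤ)) else 0 := by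
  have hen0 : 0 < en := hen
  set J := n / en with hJ
  have hJle : ∀ i, i ≤ J ↔ i * en ≤ n := by
    intro i; rw [hJ]; exact (Nat.le_div_iff_mul_le hen0)
  have hre : ∑ m ∈ (Finset.Icc 1 n).filter (fun m => en ∣ m), cfZ ((en : ℤ) :: E) ((n : ℤ) - (m : ℤ))
      = ∑ i ∈ Finset.Icc 1 J, cfZ ((en : ℤ) :: E) ((n : ℤ) - ((i * en : ℕ) : ℤ)) := by
    rw [sum_multiples (fun m => cfZ ((en : ℤ) :: E) ((n : ℤ) - (m : ℤ))) en n hen]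
  rw [hre]
  have hpt : ∀ i ∈ Finset.Icc 1 J, cfZ ((en : ℤ) :: E) ((n : ℤ) - ((i * en : ℕ) : ℤ))
      = cfZ E ((n : ℤ) - ((i * en : ℕ) : ℤ)) - (if i < J then cfZ E ((n : ℤ) - (((i+1) * en : ℕ) : ℤ)) else 0) := by
    intro i hi
    simp only [Finset.mem_Icc] at hi
    have h1 : i * en ≤ n := (hJle i).mp hi.2
    have hcond : ((en : ℤ) ≤ (n : ℤ) - ((i * en : ℕ) : ℤ)) ↔ i < J := by
      have h2 := hJle (i+1)
      constructor
      · intro h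
        have : (i+1) * en ≤ n := by push_cast at h; push_cast; nlinarith
        omega
      · intro h
        have : (i+1) * en ≤ n := h2.mp (by omega)
        push_cast at this ⊢; nlinarith
    rw [show cfZ ((en : ℤ) :: E) ((n : ℤ) - ((i * en : ℕ) : ℤ))
        = cfZ E ((n : ℤ) - ((i * en : ℕ) : ℤ)) - (if (en:ℤ) ≤ (n : ℤ) - ((i * en : ℕ) : ℤ) then cfZ E ((n : ℤ) - ((i * en : ℕ) : ℤ) - en) else 0) from rfl]
    congr 1
    rw [if_congr hcond rfl rfl]
    congr 1
    push_cast; ring_nf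
  rw [Finset.sum_congr rfl hpt, Finset.sum_sub_distrib]
  have h2 : ∑ i ∈ Finset.Icc 1 J, (if i < J then cfZ E ((n : ℤ) - (((i+1) * en : ℕ) : ℤ)) else 0)
      = ∑ i ∈ Finset.Ico 1 J, cfZ E ((n : ℤ) - (((i+1) * en : ℕ) : ℤ)) := by
    rw [← Finset.sum_filter]
    congr 1
    ext i; simp only [Finset.mem_filter, Finset.mem_Icc, Finset.mem_Ico]; omega
  rw [h2]
  have h1J : 1 ≤ J ↔ en ≤ n := by
    constructor
    · intro h; have := (hJle 1).mp h; omega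
    · intro h; exact (hJle 1).mpr (by omega)
  rcases Nat.eq_zero_or_pos J with hJ0 | hJ1
  · rw [hJ0]
    have : ¬ ((en:ℤ) ≤ (n:ℤ)) := by
      intro h; have : en ≤ n := by exact_mod_cast h
      omega
    simp [this]
  · rw [if_pos (by exact_mod_cast h1J.mp hJ1)]
    rw [show Finset.Icc 1 J = Finset.Ico 1 (J+1) from (Finset.Ico_add_one_right_eq_Icc 1 J).symm]
    rw [Finset.sum_Ico_eq_sum_range, Finset.sum_Ico_eq_sum_range]
    simp only [Nat.add_sub_cancel]
    rw [show J = (J - 1) + 1 by omega, Finset.sum_range_succ']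
    have e3 : ∀ k ∈ Finset.range (J-1), cfZ E ((n : ℤ) - (((1 + (k+1)) * en : ℕ) : ℤ))
        = cfZ E ((n : ℤ) - (((1 + k + 1) * en : ℕ) : ℤ)) := by
      intro k _; congr 2
    rw [Finset.sum_congr rfl e3]
    have : (J - 1 + 1) - 1 = J - 1 := by omega
    rw [this]
    have e5 : ∀ k ∈ Finset.range (J-1), cfZ E ((n:ℤ) - (((1 + k) + 1) * en : ℕ):ℤ)
        = cfZ E ((n : ℤ) - (((1 + k + 1) * en : ℕ) : ℤ)) := by
      intro k _; rfl
    rw [Finset.sum_congr rfl e5]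
    have : cfZ E ((n : ℤ) - (((1 + 0) * en : ℕ) : ℤ)) = cfZ E ((n : ℤ) - (en : ℤ)) := by
      congr 1; push_cast; ring
    rw [this]
    ring

theorem keyRec (E : List Int) (hE : ∀ x ∈ E, 1 ≤ x) (n : ℕ) :
    (n : ℤ) * cfZ E n = ∑ m ∈ Finset.Icc 1 n, ddv E m * cfZ E ((n : ℤ) - (m : ℤ)) := by
  induction E generalizing n with
  | nil =>
    have h0 : (n : ℤ) * cfZ [] n = 0 := by
      rcases Nat.eq_zero_or_pos n with h | h
      · subst h; simp
      · have : ((n : ℤ)) ≠ 0 := by omega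
        simp [cfZ, this]
    rw [h0]
    symm
    apply Finset.sum_eq_zero
    intro m _
    simp [ddv]
  | cons e E ih =>
    have he : 1 ≤ e := hE e (by simp)
    have hE' : ∀ x ∈ E, 1 ≤ x := fun x hx => hE x (by simp [hx])
    set en : ℕ := e.toNat with hen
    have hee : e = (en : ℤ) := by omega
    have hen1 : 1 ≤ en := by omega
    have hdvd : ∀ m : ℕ, (e ∣ (m : ℤ)) ↔ en ∣ m := by
      intro m; rw [hee]; exact Int.natCast_dvd_natCast
    have rhs1 : ∑ m ∈ Finset.Icc 1 n, ddv (e :: E) m * cfZ (e :: E) ((n : ℤ) - (m : ℤ))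
        = (∑ m ∈ Finset.Icc 1 n, ddv E m * cfZ (e :: E) ((n : ℤ) - (m : ℤ)))
          + (-e) * ∑ m ∈ (Finset.Icc 1 n).filter (fun m => en ∣ m), cfZ (e :: E) ((n : ℤ) - (m : ℤ)) := by
      calc ∑ m ∈ Finset.Icc 1 n, ddv (e :: E) m * cfZ (e :: E) ((n : ℤ) - (m : ℤ))
          = ∑ m ∈ Finset.Icc 1 n, ((if en ∣ m then -e * cfZ (e :: E) ((n : ℤ) - (m : ℤ)) else 0)
              + ddv E m * cfZ (e :: E) ((n : ℤ) - (m : ℤ))) := by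
            apply Finset.sum_congr rfl
            intro m _
            rw [ddv_cons, if_congr (hdvd m) rfl rfl, add_mul, ite_mul, zero_mul]
        _ = _ := by
            rw [Finset.sum_add_distrib, ← Finset.sum_filter, Finset.mul_sum]
            ring
    have htel := tel E en hen1 n
    rw [← hee] at htel
    rw [rhs1, htel]
    have qdef : ∀ z : ℤ, cfZ (e :: E) z = cfZ E z - (if e ≤ z then cfZ E (z - e) else 0) := fun z => rfl
    have S1 : ∑ m ∈ Finset.Icc 1 n, ddv E m * cfZ (e :: E) ((n : ℤ) - (m : ℤ))
        = (∑ m ∈ Finset.Icc 1 n, ddv E m * cfZ E ((n : ℤ) - (m : ℤ)))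
          - ∑ m ∈ Finset.Icc 1 n, ddv E m * (if e ≤ (n : ℤ) - (m : ℤ) then cfZ E ((n : ℤ) - (m : ℤ) - e) else 0) := by
      rw [← Finset.sum_sub_distrib]
      apply Finset.sum_congr rfl
      intro m _
      rw [qdef]
      ring
    rw [S1, ← ih hE' n]
    by_cases hcase : en ≤ n
    · have hce : (e : ℤ) ≤ (n : ℤ) := by omega
      rw [if_pos hce]
      set n' : ℕ := n - en with hn'
      have hnn : (n' : ℤ) = (n : ℤ) - e := by omega
      have S2 : ∑ m ∈ Finset.Icc 1 n, ddv E m * (if e ≤ (n : ℤ) - (m : ℤ) then cfZ E ((n : ℤ) - (m : ℤ) - e) else 0)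
          = ∑ m ∈ Finset.Icc 1 n', ddv E m * cfZ E ((n' : ℤ) - (m : ℤ)) := by
        rw [← Finset.sum_subset (Finset.Icc_subset_Icc_right (by omega : n' ≤ n)) ?_]
        · apply Finset.sum_congr rfl
          intro m hm
          simp only [Finset.mem_Icc] at hm
          rw [if_pos (by omega), show (n : ℤ) - (m : ℤ) - e = (n' : ℤ) - (m : ℤ) by omega]
        · intro m hm hm'
          simp only [Finset.mem_Icc] at hm hm'
          rw [if_neg (by omega)]
          ring
      rw [S2, ← ih hE' n']
      rw [qdef]
      rw [if_pos hce]
      rw [show (n : ℤ) - e = (n' : ℤ) from hnn.symm]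
      have : (n : ℤ) = (n' : ℤ) + e := by omega
      rw [this]
      ring
    · have hce : ¬ ((e : ℤ) ≤ (n : ℤ)) := by omega
      rw [if_neg hce]
      have S2 : ∑ m ∈ Finset.Icc 1 n, ddv E m * (if e ≤ (n : ℤ) - (m : ℤ) then cfZ E ((n : ℤ) - (m : ℤ) - e) else 0) = 0 := by
        apply Finset.sum_eq_zero
        intro m hm
        simp only [Finset.mem_Icc] at hm
        rw [if_neg (by omega)]
        ring
      rw [S2, qdef, if_neg hce]
      ring


theorem base_co (M : ℕ) : ∀ k : ℕ, k < M + 1 → (1 :: List.replicate M 0).getD k 0 = cfZ [] (k : Int) := by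
  intro k hk
  cases k with
  | zero => simp [cfZ]
  | succ k =>
    norm_num [cfZ, List.getD_cons_succ]
    omega

theorem mem_exps_ge (bound step e x : Int) (hx : x ∈ exps bound step e) : e ≤ x := by
  rw [exps] at hx
  split at hx
  · rcases List.mem_cons.mp hx with h | h
    · omega
    · have := mem_exps_ge bound step (e + step) x h
      omega
  · simp at hx
termination_by (bound + 1 - e).toNat
decreasing_by omega


-- range(a, b, s) for positive s: nil / cons unfoldings
theorem pyRange_pos_eq_nil (a b s : Int) (hs : 0 < s) (h : b ≤ a) :
    PySem.List.pyRange a b s = [] := by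
  rw [PySem.List.pyRange_of_pos _ _ hs, if_neg (by omega)]
  simp

theorem pyRange_pos_cons (a b s : Int) (hs : 0 < s) (h : a < b) :
    PySem.List.pyRange a b s = a :: PySem.List.pyRange (a + s) b s := by
  rw [PySem.List.pyRange_of_pos _ _ hs, PySem.List.pyRange_of_pos _ _ hs]
  rw [if_pos h]
  by_cases h2 : a + s < b
  · rw [if_pos h2]
    have hdiv : (b - a + s - 1) / s = (b - (a + s) + s - 1) / s + 1 := by
      have h1 : b - a + s - 1 = (b - (a + s) + s - 1) + 1 * s := by ring
      rw [h1, Int.add_mul_ediv_right _ _ (by omega : s ≠ 0)]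
    have hq0 : 0 ≤ (b - (a + s) + s - 1) / s := by
      apply Int.ediv_nonneg (by omega) (by omega)
    rw [hdiv, show ((b - (a + s) + s - 1) / s + 1).toNat = ((b - (a + s) + s - 1) / s).toNat + 1 by omega]
    rw [List.range_succ_eq_map, List.map_cons, List.map_map]
    congr 1
    · simp
    · apply List.map_congr_left
      intro k _
      simp only [Function.comp_apply]
      push_cast
      ring
  · rw [if_neg h2]
    have hb : b ≤ a + s := by omega
    have hq : (b - a + s - 1) / s = 1 := by
      have h1 : b - a + s - 1 = (b - a - 1) + 1 * s := by ring
      rw [h1, Int.add_mul_ediv_right _ _ (by omega : s ≠ 0)]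
      rw [Int.ediv_eq_zero_of_lt (by omega) (by omega)]
      ring
    have hq2 : b - (a + s) ≤ 0 := by omega
    rw [hq]
    simp


theorem exps_eq_pyRange (bound step : Int) (hst : 0 < step) (e : Int) :
    exps bound step e = PySem.List.pyRange e (bound + 1) step := by
  rw [exps]
  by_cases hc : e ≤ bound
  · rw [dif_pos ⟨hc, hst⟩, exps_eq_pyRange bound step hst (e + step)]
    rw [pyRange_pos_cons e (bound + 1) step hst (by omega)]
  · rw [dif_neg (by omega), pyRange_pos_eq_nil _ _ _ hst (by omega)]
termination_by (bound + 1 - e).toNat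
decreasing_by omega

-- running tail: Tsum c en n = sum_{j>=1, j*en<=n} c(n - j*en)
def Tsum (c : Int → Int) (en : ℕ) (n : ℕ) : Int :=
  ∑ i ∈ Finset.Icc 1 (n / en), c ((n : ℤ) - ((i * en : ℕ) : ℤ))

theorem Tsum_zero (c : Int → Int) (en n : ℕ) (h : n < en) : Tsum c en n = 0 := by
  unfold Tsum
  rw [Nat.div_eq_of_lt h]
  simp

theorem Tsum_rec (c : Int → Int) (en n : ℕ) (hen : 1 ≤ en) (h : en ≤ n) :
    Tsum c en n = c ((n : ℤ) - (en : ℤ)) + Tsum c en (n - en) := by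
  unfold Tsum
  have hd : n / en = (n - en) / en + 1 := Nat.div_eq_sub_div hen h
  set J' : ℕ := (n - en) / en with hJ'
  rw [hd]
  rw [show Finset.Icc 1 (J' + 1) = Finset.Ico 1 (J' + 2) from (Finset.Ico_add_one_right_eq_Icc 1 (J'+1)).symm]
  rw [show Finset.Icc 1 J' = Finset.Ico 1 (J' + 1) from (Finset.Ico_add_one_right_eq_Icc 1 J').symm]
  rw [Finset.sum_Ico_eq_sum_range, Finset.sum_Ico_eq_sum_range]
  rw [show J' + 2 - 1 = J' + 1 from rfl, show J' + 1 - 1 = J' from rfl]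
  rw [Finset.sum_range_succ']
  have e1 : ∀ k ∈ Finset.range J', c ((n : ℤ) - (((1 + (k + 1)) * en : ℕ) : ℤ))
      = c (((n - en : ℕ) : ℤ) - (((1 + k) * en : ℕ) : ℤ)) := by
    intro k _
    congr 1
    push_cast
    have : (en : ℤ) ≤ n := by exact_mod_cast h
    ring_nf
    omega
  rw [Finset.sum_congr rfl e1]
  have e2 : c ((n : ℤ) - (((1 + 0) * en : ℕ) : ℤ)) = c ((n : ℤ) - (en : ℤ)) := by
    congr 1
    push_cast
    ring
  rw [e2]
  ring

-- regrouping the divisor-sum convolution by factors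
theorem sums_eq (c : Int → Int) (es : List Int) (hes : ∀ e ∈ es, 1 ≤ e) (n : ℕ) :
    ∑ m ∈ Finset.Icc 1 n, ddv es (m : Int) * c ((n : ℤ) - (m : ℤ))
      = (es.map (fun e => -e * Tsum c e.toNat n)).sum := by
  induction es with
  | nil =>
    simp [ddv]
  | cons e es ih =>
    have he : 1 ≤ e := hes e (by simp)
    have hes' : ∀ x ∈ es, 1 ≤ x := fun x hx => hes x (by simp [hx])
    set en : ℕ := e.toNat with hen
    have hee : e = (en : ℤ) := by omega
    have hen1 : 1 ≤ en := by omega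
    have hdvd : ∀ m : ℕ, (e ∣ (m : ℤ)) ↔ en ∣ m := by
      intro m
      rw [hee]
      exact Int.natCast_dvd_natCast
    have h1 : ∑ m ∈ Finset.Icc 1 n, ddv (e :: es) (m : Int) * c ((n : ℤ) - (m : ℤ))
        = (∑ m ∈ Finset.Icc 1 n, ddv es (m : Int) * c ((n : ℤ) - (m : ℤ)))
          + (-e) * ∑ m ∈ (Finset.Icc 1 n).filter (fun m => en ∣ m), c ((n : ℤ) - (m : ℤ)) := by
      calc ∑ m ∈ Finset.Icc 1 n, ddv (e :: es) (m : Int) * c ((n : ℤ) - (m : ℤ))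
          = ∑ m ∈ Finset.Icc 1 n, ((if en ∣ m then -e * c ((n : ℤ) - (m : ℤ)) else 0)
              + ddv es (m : Int) * c ((n : ℤ) - (m : ℤ))) := by
            apply Finset.sum_congr rfl
            intro m _
            rw [ddv_cons, if_congr (hdvd m) rfl rfl, add_mul, ite_mul, zero_mul]
        _ = _ := by
            rw [Finset.sum_add_distrib, ← Finset.sum_filter, Finset.mul_sum]
            ring
    rw [h1, ih hes', sum_multiples (fun m => c ((n : ℤ) - (m : ℤ))) en n hen1]
    rw [List.map_cons, List.sum_cons]
    rw [show Tsum c e.toNat n = ∑ i ∈ Finset.Icc 1 (n / en), c ((n : ℤ) - ((i * en : ℕ) : ℤ)) from rfl]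
    ring


-- one pass of the inner factor loop: accumulates -e * Tsum and writes the new tail entries
theorem inner2_char (c : Int → Int) (p : List Int) (n : Int) (hn1 : 1 ≤ n) (hnp : n < (p.length : Int))
    (hp : ∀ k : ℕ, (k : Int) < n → p.getD k 0 = c (k : Int)) :
    ∀ (ets : List (Int × List Int)) (s0 : Int) (acc0 : List (List Int)),
      (∀ et ∈ ets, 1 ≤ et.1 ∧ et.2.length = p.length ∧
        (∀ k : ℕ, k < et.2.length → et.2.getD k 0 = if (k : Int) < n then Tsum c et.1.toNat k else 0)) →
      ets.foldl
        (fun acc et =>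
          if et.1 ≤ n then
            let v := PySem.List.pyGetD p (n - et.1) 0 + PySem.List.pyGetD et.2 (n - et.1) 0
            (acc.1 - et.1 * v, acc.2 ++ [PySem.List.pySetD et.2 n v])
          else (acc.1, acc.2 ++ [et.2])) (s0, acc0)
      = (s0 + (ets.map (fun et => -(et.1) * Tsum c et.1.toNat n.toNat)).sum,
         acc0 ++ ets.map (fun et => if et.1 ≤ n then et.2.set n.toNat (Tsum c et.1.toNat n.toNat) else et.2)) := by
  intro ets
  induction ets with
  | nil => intro s0 acc0 _; simp
  | cons et ets ih =>
    intro s0 acc0 hin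
    obtain ⟨he, hlen, ht⟩ := hin et (by simp)
    rw [List.foldl_cons]
    by_cases hc : et.1 ≤ n
    · have hv : PySem.List.pyGetD p (n - et.1) 0 + PySem.List.pyGetD et.2 (n - et.1) 0
          = Tsum c et.1.toNat n.toNat := by
        have h1 : PySem.List.pyGetD p (n - et.1) 0 = c ((n.toNat : ℤ) - (et.1.toNat : ℤ)) := by
          rw [show n - et.1 = (((n - et.1).toNat : ℕ) : ℤ) by omega, PySem.List.pyGetD_natCast]
          rw [hp (n - et.1).toNat (by omega)]
          congr 1
          omega
        have h2 : PySem.List.pyGetD et.2 (n - et.1) 0 = Tsum c et.1.toNat (n.toNat - et.1.toNat) := by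
          rw [show n - et.1 = (((n - et.1).toNat : ℕ) : ℤ) by omega, PySem.List.pyGetD_natCast]
          rw [ht (n - et.1).toNat (by omega), if_pos (by omega)]
          congr 1
          omega
        rw [h1, h2, ← Tsum_rec c et.1.toNat n.toNat (by omega) (by omega)]
      rw [if_pos hc]
      show (ets.foldl _ (s0 - et.1 * _, acc0 ++ [PySem.List.pySetD et.2 n _])) = _
      rw [ih _ _ (fun x hx => hin x (by simp [hx]))]
      rw [Prod.mk.injEq]
      constructor
      · rw [hv, List.map_cons, List.sum_cons]
        ring
      · rw [show PySem.List.pySetD et.2 n (PySem.List.pyGetD p (n - et.1) 0 + PySem.List.pyGetD et.2 (n - et.1) 0)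
            = et.2.set n.toNat (Tsum c et.1.toNat n.toNat) by
          rw [hv, show n = ((n.toNat : ℕ) : ℤ) by omega, PySem.List.pySetD_natCast]
          simp only [Int.toNat_natCast]]
        rw [List.map_cons, if_pos hc]
        simp
    · rw [if_neg hc]
      rw [ih _ _ (fun x hx => hin x (by simp [hx]))]
      rw [Prod.mk.injEq]
      constructor
      · rw [List.map_cons, List.sum_cons, Tsum_zero c et.1.toNat n.toNat (by omega)]
        ring
      · rw [List.map_cons, if_neg hc]
        simp

-- updating one tail preserves the tail invariant, advanced from n to n+1
theorem tail_update_inv (c : Int → Int) (e : Int) (t : List Int) (n : Int) (hn1 : 1 ≤ n) (he : 1 ≤ e)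
    (hlen : n < (t.length : Int))
    (ht : ∀ k : ℕ, k < t.length → t.getD k 0 = if (k : Int) < n then Tsum c e.toNat k else 0) :
    (if e ≤ n then t.set n.toNat (Tsum c e.toNat n.toNat) else t).length = t.length ∧
    ∀ k : ℕ, k < t.length →
      (if e ≤ n then t.set n.toNat (Tsum c e.toNat n.toNat) else t).getD k 0
        = if (k : Int) < n + 1 then Tsum c e.toNat k else 0 := by
  have hntn : n.toNat < t.length := by omega
  by_cases hc : e ≤ n
  · rw [if_pos hc]
    refine ⟨by simp, fun k hk => ?_⟩
    rw [getD_set_int t n.toNat k _ hntn]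
    by_cases hke : k = n.toNat
    · subst hke
      rw [if_pos rfl, if_pos (by omega)]
    · rw [if_neg hke, ht k hk]
      rw [if_congr (show ((k : Int) < n) ↔ ((k : Int) < n + 1) by omega) rfl rfl]
  · rw [if_neg hc]
    refine ⟨rfl, fun k hk => ?_⟩
    rw [ht k hk]
    by_cases hke : k = n.toNat
    · subst hke
      rw [if_neg (by omega), if_pos (by omega), Tsum_zero c e.toNat n.toNat (by omega)]
    · rw [if_congr (show ((k : Int) < n) ↔ ((k : Int) < n + 1) by omega) rfl rfl]

-- zip bookkeeping
theorem zip_map_fst_sum (g : Int → Int) :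
    ∀ (es : List Int) (ts : List (List Int)), ts.length = es.length →
      ((es.zip ts).map (fun et => g et.1)).sum = (es.map g).sum := by
  intro es
  induction es with
  | nil => intro ts _; simp
  | cons e es ih =>
    intro ts hl
    cases ts with
    | nil => simp at hl
    | cons t ts =>
      simp only [List.zip_cons_cons, List.map_cons, List.sum_cons]
      rw [ih ts (by simpa using hl)]

theorem zip_of_zip_map (f : Int × List Int → List Int) :
    ∀ (es : List Int) (ts : List (List Int)), ts.length = es.length →
      es.zip ((es.zip ts).map f) = (es.zip ts).map (fun et => (et.1, f et)) := by
  intro es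
  induction es with
  | nil => intro ts _; simp
  | cons e es ih =>
    intro ts hl
    cases ts with
    | nil => simp at hl
    | cons t ts =>
      simp only [List.zip_cons_cons, List.map_cons]
      rw [ih ts (by simpa using hl)]


-- the main loop: p carries the coefficients c below u, tails carry their Tsum values
theorem BLoop2_char (L : Int) (c : Int → Int) (es : List Int)
    (hes : ∀ e ∈ es, 1 ≤ e)
    (hkey : ∀ n : ℕ, 1 ≤ n → (n : Int) ≤ L →
      (n : ℤ) * c (n : Int) = (es.map (fun e => -e * Tsum c e.toNat n)).sum) :
    ∀ (N : ℕ) (u : Int) (p : List Int) (tails : List (List Int)),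
      (L + 1 - u).toNat ≤ N → 1 ≤ u → u ≤ L + 1 → (p.length : Int) = L + 1 →
      (∀ k : ℕ, (k : Int) < u → p.getD k 0 = c (k : Int)) →
      tails.length = es.length →
      (∀ et ∈ es.zip tails, et.2.length = p.length ∧
        (∀ k : ℕ, k < et.2.length → et.2.getD k 0 = if (k : Int) < u then Tsum c et.1.toNat k else 0)) →
      (((PySem.List.pyRange u (L + 1) 1).foldl
          (fun st n =>
            let r := qpochBStep st.1 n (es.zip st.2)
            (PySem.List.pySetD st.1 n (PySem.Int.floordiv r.1 n), r.2)) (p, tails)).1.length = p.length ∧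
       ∀ k : ℕ, k < p.length →
        (((PySem.List.pyRange u (L + 1) 1).foldl
          (fun st n =>
            let r := qpochBStep st.1 n (es.zip st.2)
            (PySem.List.pySetD st.1 n (PySem.Int.floordiv r.1 n), r.2)) (p, tails)).1).getD k 0 = c (k : Int)) := by
  intro N
  induction N with
  | zero =>
    intro u p tails hN hu1 hu2 hplen hco htlen htails
    rw [PySem.List.pyRange_one_eq_nil (by omega)]
    exact ⟨rfl, fun k hk => hco k (by omega)⟩
  | succ N ih =>
    intro u p tails hN hu1 hu2 hplen hco htlen htails
    by_cases hc : u ≤ L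
    · rw [PySem.List.pyRange_one_cons (by omega), List.foldl_cons]
      have hin : ∀ et ∈ es.zip tails, 1 ≤ et.1 ∧ et.2.length = p.length ∧
          (∀ k : ℕ, k < et.2.length → et.2.getD k 0 = if (k : Int) < u then Tsum c et.1.toNat k else 0) := by
        intro et het
        exact ⟨hes et.1 (List.of_mem_zip het).1, (htails et het).1, (htails et het).2⟩
      have hstep : qpochBStep p u (es.zip tails)
          = (0 + ((es.zip tails).map (fun et => -(et.1) * Tsum c et.1.toNat u.toNat)).sum,
             [] ++ (es.zip tails).map
               (fun et => if et.1 ≤ u then et.2.set u.toNat (Tsum c et.1.toNat u.toNat) else et.2)) := by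
        exact inner2_char c p u hu1 (by omega) hco (es.zip tails) 0 [] hin
      have hs1 : (qpochBStep p u (es.zip tails)).1 = u * c u := by
        rw [hstep]
        show 0 + _ = _
        rw [zero_add, zip_map_fst_sum (fun e => -e * Tsum c e.toNat u.toNat) es tails htlen]
        rw [← hkey u.toNat (by omega) (by omega)]
        rw [show ((u.toNat : ℕ) : ℤ) = u from by omega]
      have hfd : PySem.Int.floordiv (qpochBStep p u (es.zip tails)).1 u = c u := by
        rw [hs1, PySem.Int.floordiv_eq_ediv_of_pos (by omega)]
        exact Int.mul_ediv_cancel_left _ (by omega)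
      have hset : PySem.List.pySetD p u (PySem.Int.floordiv (qpochBStep p u (es.zip tails)).1 u)
          = p.set u.toNat (c u) := by
        rw [hfd]
        exact PySem.List.pySetD_of_nonneg p (c u) (by omega)
      have htails2 : (qpochBStep p u (es.zip tails)).2
          = (es.zip tails).map
              (fun et => if et.1 ≤ u then et.2.set u.toNat (Tsum c et.1.toNat u.toNat) else et.2) := by
        rw [hstep]
        simp
      obtain ⟨i1, i2⟩ := ih (u + 1) (p.set u.toNat (c u)) ((qpochBStep p u (es.zip tails)).2)
        (by omega) (by omega) (by omega) (by simpa using hplen)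
        (by
          intro k hk
          rw [getD_set_int p u.toNat k _ (by omega)]
          by_cases hke : k = u.toNat
          · subst hke
            rw [if_pos rfl]
            congr 1
            omega
          · rw [if_neg hke]
            exact hco k (by omega))
        (by rw [htails2, List.length_map, List.length_zip]; omega)
        (by
          rw [htails2, zip_of_zip_map _ es tails htlen]
          intro et' het'
          obtain ⟨et, het, rfl⟩ := List.mem_map.mp het'
          obtain ⟨q1, q2⟩ := tail_update_inv c et.1 et.2 u hu1 (hes et.1 (List.of_mem_zip het).1)
            (by have := (htails et het).1; omega) (htails et het).2
          constructor
          · rw [q1]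
            simp only [List.length_set]
            exact (htails et het).1
          · intro k hk
            rw [q1] at hk
            exact q2 k hk)
      have happ : (let r := qpochBStep (p, tails).1 u (es.zip (p, tails).2)
            (PySem.List.pySetD (p, tails).1 u (PySem.Int.floordiv r.1 u), r.2))
          = (p.set u.toNat (c u), (qpochBStep p u (es.zip tails)).2) := by
        show (PySem.List.pySetD p u (PySem.Int.floordiv (qpochBStep p u (es.zip tails)).1 u),
          (qpochBStep p u (es.zip tails)).2) = _
        rw [hset]
      rw [happ]
      constructor
      · rw [i1]
        simp
      · intro k hk
        exact i2 k (by simpa using hk)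
    · rw [PySem.List.pyRange_one_eq_nil (by omega)]
      exact ⟨rfl, fun k hk => hco k (by omega)⟩

-- ===== VERDICT (by name: the statement is the Claim_ definition above) =====
theorem qpochhammer_arith_py_spec : Claim_equal_qpochhammer_arith_py := by
  intro max_deg step offset _ hpre
  obtain ⟨hst, hoff⟩ := hpre
  unfold Spec_qpochhammer_arith_py qpochhammer_arith_py qpochhammer_arith_py_alt
  rw [if_neg (by omega), if_neg (by omega), if_neg (by omega), if_neg (by omega)]
  by_cases hmd : 0 ≤ max_deg
  · -- main case: L = max_deg
    have hLif : (if max_deg > 0 then max_deg else 0) = max_deg := by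
      split <;> omega
    rw [hLif]
    show qpochALoop max_deg step offset (1 :: List.replicate max_deg.toNat 0)
      = ((PySem.List.pyRange 1 (max_deg + 1) 1).foldl
          (fun st n =>
            let r := qpochBStep st.1 n ((PySem.List.pyRange offset (max_deg + 1) step).zip st.2)
            (PySem.List.pySetD st.1 n (PySem.Int.floordiv r.1 n), r.2))
          (1 :: List.replicate max_deg.toNat 0,
           (PySem.List.pyRange offset (max_deg + 1) step).map
             (fun _ => List.replicate (max_deg + 1).toNat 0))).1
    rw [← exps_eq_pyRange max_deg step hst offset]
    set E : List Int := exps max_deg step offset with hEdef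
    have hE : ∀ x ∈ E, 1 ≤ x := fun x hx => by
      have := mem_exps_ge max_deg step offset x hx
      omega
    have hErev : ∀ x ∈ E.reverse, 1 ≤ x := fun x hx => hE x (List.mem_reverse.mp hx)
    set c : Int → Int := cfZ E.reverse with hcdef
    have hblen : (((1 :: List.replicate max_deg.toNat 0 : List Int)).length : Int) = max_deg + 1 := by
      simp
      omega
    -- A side
    obtain ⟨a1, a2⟩ := loopA_char max_deg step hst (max_deg + 1 - offset).toNat offset
      (1 :: List.replicate max_deg.toNat 0) [] (le_refl _) hoff hblen
      (by
        intro k hk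
        simp only [List.length_cons, List.length_replicate] at hk
        exact base_co max_deg.toNat k hk)
    -- B side
    have hkey : ∀ n : ℕ, 1 ≤ n → (n : Int) ≤ max_deg →
        (n : ℤ) * c (n : Int) = (E.map (fun e => -e * Tsum c e.toNat n)).sum := by
      intro n _ _
      calc (n : ℤ) * c (n : Int)
          = ∑ m ∈ Finset.Icc 1 n, ddv E.reverse (m : Int) * cfZ E.reverse ((n : ℤ) - (m : ℤ)) :=
            keyRec E.reverse hErev n
        _ = ∑ m ∈ Finset.Icc 1 n, ddv E (m : Int) * c ((n : ℤ) - (m : ℤ)) := by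
            apply Finset.sum_congr rfl
            intro m _
            rw [ddv_reverse]
        _ = (E.map (fun e => -e * Tsum c e.toNat n)).sum := sums_eq c E hE n
    obtain ⟨b1, b2⟩ := BLoop2_char max_deg c E hE hkey max_deg.toNat 1
      (1 :: List.replicate max_deg.toNat 0)
      (E.map (fun _ => List.replicate (max_deg + 1).toNat 0))
      (by omega) (by omega) (by omega) hblen
      (by
        intro k hk
        have hk0 : k = 0 := by omega
        subst hk0
        simp only [List.getD_cons_zero]
        rw [show ((0 : ℕ) : ℤ) = (0 : ℤ) from rfl, hcdef, cfZ_zero E.reverse hErev])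
      (by simp)
      (by
        intro et het
        have h1 : et.1 ∈ E := (List.of_mem_zip het).1
        have h2 : et.2 ∈ E.map (fun _ => List.replicate (max_deg + 1).toNat 0) := (List.of_mem_zip het).2
        obtain ⟨e0, _, heq⟩ := List.mem_map.mp h2
        have he1 : 1 ≤ et.1 := hE et.1 h1
        constructor
        · rw [← heq]
          simp
          omega
        · intro k hk
          rw [← heq] at hk ⊢
          simp only [List.length_replicate] at hk
          rw [List.getD_replicate 0 hk]
          by_cases hk1 : (k : Int) < 1
          · have hk0 : k = 0 := by omega
            subst hk0
            rw [if_pos hk1, Tsum_zero c et.1.toNat 0 (by omega)]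
          · rw [if_neg hk1])
    apply List.ext_getElem
    · rw [a1]
      rw [b1]
    · intro i h1 h2
      have h1' : i < (1 :: List.replicate max_deg.toNat 0 : List Int).length := by
        rw [← a1]
        exact h1
      rw [← List.getD_eq_getElem _ 0 h1, ← List.getD_eq_getElem _ 0 h2]
      rw [a2 i (by simpa using h1'), b2 i (by simpa using h1')]
      rw [List.append_nil]
  · -- degenerate case max_deg < 0: both sides are [1]
    have hLif : (if max_deg > 0 then max_deg else 0) = 0 := by
      split <;> omega
    rw [hLif]
    show qpochALoop max_deg step offset (1 :: List.replicate max_deg.toNat 0)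
      = ((PySem.List.pyRange 1 ((0 : ℤ) + 1) 1).foldl
          (fun st n =>
            let r := qpochBStep st.1 n ((PySem.List.pyRange offset ((0 : ℤ) + 1) step).zip st.2)
            (PySem.List.pySetD st.1 n (PySem.Int.floordiv r.1 n), r.2))
          (1 :: List.replicate (0 : ℤ).toNat 0,
           (PySem.List.pyRange offset ((0 : ℤ) + 1) step).map
             (fun _ => List.replicate ((0 : ℤ) + 1).toNat 0))).1
    rw [qpochALoop, dif_neg (by omega)]
    rw [PySem.List.pyRange_one_eq_nil (by norm_num), List.foldl_nil]
    rw [show max_deg.toNat = 0 by omega]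
    simp
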